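-- pv_equiv track=rewrite | github.com/Rogmar0071/RBagoii | backend/app/mutation_simulation/dependency_surface.py | _is_restricted
-- ===== SOURCE A (Python) =====
-- _RESTRICTED_PATH_SEGMENTS: frozenset[str] = frozenset(
--     {".env", "secrets", "infra/credentials"}
-- )
--
-- def _is_restricted(path: str) -> bool:
--     """Return True when *path* contains a restricted segment."""
--     norm = path.replace("\\", "/").lstrip("/")
--     for segment in norm.split("/"):
--         if segment in _RESTRICTED_PATH_SEGMENTS:
--             return True
--     for restricted in _RESTRICTED_PATH_SEGMENTS:
--         if restricted in norm:
--             return True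
--     return False
-- ===== SOURCE B (Python) =====
-- _RESTRICTED_PATH_SEGMENTS: frozenset[str] = frozenset(
--     {".env", "secrets", "infra/credentials"}
-- )
--
-- def _is_restricted(path: str) -> bool:
--     """Return True when *path* contains a restricted segment."""
--     norm = path.replace("\\", "/").lstrip("/")
--     # Single left-to-right position scan: at each index test whether any
--     # restricted token starts there (a naive multi-pattern matcher), instead
--     # of one substring search per token.
--     i = 0
--     while i < len(norm):
--         if norm.startswith((".env", "secrets", "infra/credentials"), i):
--             return True
--         i += 1
--     return False
-- ===== Notes on version B (the rewrite author's own statement) =====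
-- stated objective: alternative
-- what changed: B replaces A's two staged passes (segment split + exact match, then one substring search per restricted token) by a single left-to-right position scan of the normalized path that tests startswith of all three tokens at each index, i.e. a naive multi-pattern matcher in one loop.
import Mathlib
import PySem

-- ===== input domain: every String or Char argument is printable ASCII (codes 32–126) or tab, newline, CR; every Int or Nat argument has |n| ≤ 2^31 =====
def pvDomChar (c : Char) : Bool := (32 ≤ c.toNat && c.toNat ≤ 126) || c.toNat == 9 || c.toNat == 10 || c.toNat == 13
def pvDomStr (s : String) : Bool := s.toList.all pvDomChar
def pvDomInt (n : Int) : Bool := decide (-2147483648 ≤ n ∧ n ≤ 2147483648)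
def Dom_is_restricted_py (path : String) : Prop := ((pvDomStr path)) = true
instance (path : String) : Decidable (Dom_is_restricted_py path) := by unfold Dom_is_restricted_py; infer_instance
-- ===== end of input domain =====

-- B replaces A's two staged passes by a single position scan of the normalized path testing startswith of all three tokens at each index; objective: alternative (not claimed faster).


-- ===== PORT A =====
-- the module constant _RESTRICTED_PATH_SEGMENTS (a frozenset; only membership / OR over it is used, so order is irrelevant)
def pvRestrictedSegs : List (List Char) := [".env".toList, "secrets".toList, "infra/credentials".toList]

-- norm = path.replace("\\", "/").lstrip("/"); lstrip("/") is ported by hand as dropWhile (· == '/'),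
-- exact: Python's lstrip("/") removes exactly the leading '/' characters.
def pvNorm (path : String) : List Char :=
  (PySem.Chars.replace path.toList "\\".toList "/".toList).dropWhile (· == '/')

-- first loop of A: for segment in norm.split("/"): if segment in _RESTRICTED_PATH_SEGMENTS: return True
def pvSegLoop : List (List Char) → Bool
  | [] => false
  | seg :: rest => if pvRestrictedSegs.contains seg then true else pvSegLoop rest

-- second loop of A: for restricted in _RESTRICTED_PATH_SEGMENTS: if restricted in norm: return True
def pvSubLoop (norm : List Char) : List (List Char) → Bool
  | [] => false
  | r :: rest => if PySem.Chars.isIn r norm then true else pvSubLoop norm rest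

def is_restricted_py (path : String) : Bool :=
  let norm := pvNorm path
  if pvSegLoop (PySem.Chars.splitOn norm "/".toList) then true
  else if pvSubLoop norm pvRestrictedSegs then true
  else false

-- ===== PORT B =====
-- norm.startswith((".env", "secrets", "infra/credentials"), i): Python's startswith with a tuple and a
-- start offset checks each token against norm[i:]; ported exactly as PySem.Chars.startswith on (norm.drop i).
def pvStartsAny (s : List Char) : Bool :=
  PySem.Chars.startswith s ".env".toList || PySem.Chars.startswith s "secrets".toList ||
    PySem.Chars.startswith s "infra/credentials".toList

-- the while loop of B: i runs from 0 while i < len(norm)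
def pvScan (norm : List Char) (i : Nat) : Bool :=
  if i < norm.length then
    (if pvStartsAny (norm.drop i) then true else pvScan norm (i + 1))
  else false
termination_by norm.length - i
decreasing_by omega

def is_restricted_py_alt (path : String) : Bool :=
  -- same normalization as A (lstrip("/") as dropWhile, exact), then one position scan
  let norm := (PySem.Chars.replace path.toList "\\".toList "/".toList).dropWhile (· == '/')
  pvScan norm 0

-- ===== PRECONDITION & SPEC =====
def Spec_is_restricted_py (path : String) (out : Bool) : Prop := out = is_restricted_py_alt path
instance (path : String) (out : Bool) : Decidable (Spec_is_restricted_py path out) := by unfold Spec_is_restricted_py; infer_instance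

-- ===== CLAIM (what is proved, stated in full; the proofs are below) =====
def Claim_equal_is_restricted_py : Prop := ∀ (path : String), Dom_is_restricted_py path → Spec_is_restricted_py path (is_restricted_py path)

-- ===== LEMMAS AND PROOFS =====

-- every element produced by splitOn's worker is either already in acc or an infix of cur.reverse ++ l
theorem pv_mem_splitOn_go_infix (sep : List Char) :
    ∀ (fuel : Nat) (l cur : List Char) (acc : List (List Char)) (x : List Char),
      x ∈ PySem.Chars.splitOn.go sep fuel l cur acc →
      x ∈ acc ∨ x <:+: cur.reverse ++ l := by
  intro fuel
  induction fuel with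
  | zero =>
    intro l cur acc x h
    simp [PySem.Chars.splitOn.go] at h
    rcases h with h | h
    · exact Or.inl h
    · exact Or.inr (h ▸ List.infix_refl _)
  | succ n ih =>
    intro l cur acc x h
    cases l with
    | nil =>
      simp [PySem.Chars.splitOn.go] at h
      rcases h with h | h
      · exact Or.inl h
      · exact Or.inr (h ▸ (List.prefix_append _ _).isInfix)
    | cons c rest =>
      rw [PySem.Chars.splitOn.go] at h
      split at h
      · rcases ih _ _ _ _ h with h' | h'
        · rcases List.mem_cons.mp h' with h' | h'
          · exact Or.inr (h' ▸ (List.prefix_append _ _).isInfix)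
          · exact Or.inl h'
        · refine Or.inr (h'.trans ?_)
          simp only [List.reverse_nil, List.nil_append]
          exact ((List.drop_suffix _ _).trans (List.suffix_append _ _)).isInfix
      · rcases ih _ _ _ _ h with h' | h'
        · exact Or.inl h'
        · refine Or.inr ?_
          simpa using h'

theorem pv_mem_splitOn_infix (s sep x : List Char) (h : x ∈ PySem.Chars.splitOn s sep) :
    x <:+: s := by
  unfold PySem.Chars.splitOn at h
  rcases pv_mem_splitOn_go_infix sep _ _ _ _ _ h with h' | h'
  · simp at h'
  · simpa using h'

theorem pvSegLoop_eq_any (l : List (List Char)) :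
    pvSegLoop l = l.any (fun s => pvRestrictedSegs.contains s) := by
  induction l with
  | nil => rfl
  | cons a t ih => cases h : pvRestrictedSegs.contains a <;> simp [pvSegLoop, ih]

theorem pvSubLoop_eq_any (norm : List Char) (l : List (List Char)) :
    pvSubLoop norm l = l.any (fun r => PySem.Chars.isIn r norm) := by
  induction l with
  | nil => rfl
  | cons a t ih => cases h : PySem.Chars.isIn a norm <;> simp [pvSubLoop, h, ih]

-- if A's first loop fires, some restricted string is a whole segment of norm, hence an infix,
-- hence A's second loop fires too
theorem pv_segLoop_imp_subLoop (norm : List Char)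
    (h : pvSegLoop (PySem.Chars.splitOn norm "/".toList) = true) :
    pvSubLoop norm pvRestrictedSegs = true := by
  rw [pvSegLoop_eq_any] at h
  rw [pvSubLoop_eq_any]
  rcases List.any_eq_true.mp h with ⟨seg, hmem, hres⟩
  simp only [List.contains_eq_mem, decide_eq_true_eq] at hres
  have hinf : seg <:+: norm := pv_mem_splitOn_infix _ _ _ hmem
  refine List.any_eq_true.mpr ⟨seg, hres, ?_⟩
  exact (PySem.Chars.isIn_iff_infix _ _).mpr hinf

-- one step of substring search: r occurs in c :: t iff it starts there or occurs in t
theorem pv_isIn_cons (r : List Char) (c : Char) (t : List Char) :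
    PySem.Chars.isIn r (c :: t) =
      (PySem.Chars.startswith (c :: t) r || PySem.Chars.isIn r t) := by
  rw [Bool.eq_iff_iff]
  simp [PySem.Chars.isIn_iff_infix, PySem.Chars.startswith_iff, List.infix_cons_iff]

-- the inductive step's Bool bookkeeping: scan-order OR versus per-token OR
theorem pv_bool_shuffle (a1 a2 a3 b1 b2 b3 : Bool) :
    (if (a1 || a2 || a3) then true else (b1 || (b2 || b3))) =
      ((a1 || b1) || ((a2 || b2) || (a3 || b3))) := by
  cases a1 <;> cases a2 <;> cases a3 <;> cases b1 <;> cases b2 <;> cases b3 <;> rfl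

-- B's position scan from index i computes exactly "some restricted token occurs in norm.drop i"
theorem pvScan_eq_subLoop (norm : List Char) (i : Nat) :
    pvScan norm i = pvSubLoop (norm.drop i) pvRestrictedSegs := by
  rw [pvScan]
  by_cases h : i < norm.length
  · have hd : norm.drop i = norm[i] :: norm.drop (i + 1) := List.drop_eq_getElem_cons h
    have ih := pvScan_eq_subLoop norm (i + 1)
    simp only [h, if_true, hd, pvSubLoop_eq_any, pvRestrictedSegs, List.any_cons, List.any_nil,
      Bool.or_false, pv_isIn_cons, pvStartsAny] at ih ⊢
    rw [ih]
    exact pv_bool_shuffle _ _ _ _ _ _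
  · simp only [h, if_false]
    have hnil : norm.drop i = [] := List.drop_eq_nil_of_le (by omega)
    rw [hnil]
    decide
termination_by norm.length - i
decreasing_by omega

-- ===== VERDICT (by name: the statement is the Claim_ definition above) =====
theorem is_restricted_py_spec : Claim_equal_is_restricted_py := by
  intro path _
  unfold Spec_is_restricted_py
  have halt : is_restricted_py_alt path = pvSubLoop (pvNorm path) pvRestrictedSegs := by
    unfold is_restricted_py_alt
    rw [pvScan_eq_subLoop]
    rfl
  rw [halt]
  unfold is_restricted_py
  by_cases h : pvSegLoop (PySem.Chars.splitOn (pvNorm path) "/".toList) = true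
  · simp only [h, if_true, pv_segLoop_imp_subLoop _ h]
  · simp only [Bool.not_eq_true] at h
    simp only [h, Bool.false_eq_true, if_false]
    cases h2 : pvSubLoop (pvNorm path) pvRestrictedSegs <;> simp
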